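-- pv_equiv track=rewrite | github.com/Argimirodelpozo/teal-verifier | cli/cbmc_utils.py | _extract_trace
-- ===== SOURCE A (Python) =====
-- def _extract_trace(stdout: str) -> str:
--     """Extract the counterexample trace from CBMC output."""
--     lines = stdout.split("\n")
--     trace_lines = []
--     in_trace = False
--     for line in lines:
--         if "Counterexample" in line or line.startswith("Trace for "):
--             in_trace = True
--         if in_trace:
--             if line.startswith("** ") or "VERIFICATION" in line:
--                 break
--             trace_lines.append(line)
--     return "\n".join(trace_lines) if trace_lines else ""
-- ===== SOURCE B (Python) =====
-- def _is_start(line):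
--     return "Counterexample" in line or line.startswith("Trace for ")
--
--
-- def _is_end(line):
--     return line.startswith("** ") or "VERIFICATION" in line
--
--
-- def _extract_trace(stdout: str) -> str:
--     """Extract the counterexample trace from CBMC output."""
--     lines = stdout.split("\n")
--     start = next((i for i, l in enumerate(lines) if _is_start(l)), None)
--     if start is None:
--         return ""
--     tail = lines[start:]
--     stop = next((i for i, l in enumerate(tail) if _is_end(l)), len(tail))
--     return "\n".join(tail[:stop])
-- ===== Notes on version B (the rewrite author's own statement) =====
-- stated objective: alternative
-- what changed: Replaces A's stateful in_trace-flag collecting loop with an index-based computation: find the index of the first start line, then the index of the first end line at or after it, and return the slice between them joined.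
import Mathlib
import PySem

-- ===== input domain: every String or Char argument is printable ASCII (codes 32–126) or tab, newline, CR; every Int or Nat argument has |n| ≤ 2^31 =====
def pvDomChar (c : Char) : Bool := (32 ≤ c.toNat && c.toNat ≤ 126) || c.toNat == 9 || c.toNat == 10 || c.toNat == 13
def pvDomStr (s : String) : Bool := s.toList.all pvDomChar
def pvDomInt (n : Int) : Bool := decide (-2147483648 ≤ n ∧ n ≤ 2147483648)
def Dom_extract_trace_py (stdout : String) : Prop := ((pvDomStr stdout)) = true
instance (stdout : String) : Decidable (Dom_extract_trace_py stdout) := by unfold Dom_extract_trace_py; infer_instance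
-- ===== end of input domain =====

-- B replaces A's stateful in_trace-flag collecting loop by an index computation:
-- find the first start line's index, then the first end line's index in the tail, and join that slice (alternative decomposition).

-- ===== PORT A =====
-- A's for-loop over the lines, carrying the trace_lines accumulator and the in_trace flag; break = return acc.
def aLoop : List String → List String → Bool → List String
  | [], acc, _ => acc
  | l :: rest, acc, inTrace =>
    let inTrace' := if PySem.Str.isIn "Counterexample" l || PySem.Str.startswith l "Trace for " then true else inTrace
    if inTrace' then
      if PySem.Str.startswith l "** " || PySem.Str.isIn "VERIFICATION" l then acc
      else aLoop rest (acc ++ [l]) inTrace'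
    else aLoop rest acc inTrace'

def extract_trace_py (stdout : String) : String :=
  -- stdout.split("\n"): the separator is the non-empty literal "\n", so split? is always some
  let lines := (PySem.Str.split? stdout "\n").getD []
  let trace_lines := aLoop lines [] false
  if trace_lines ≠ [] then PySem.Str.join "\n" trace_lines else ""

-- ===== PORT B =====
def isStartB (l : String) : Bool := PySem.Str.isIn "Counterexample" l || PySem.Str.startswith l "Trace for "
def isEndB (l : String) : Bool := PySem.Str.startswith l "** " || PySem.Str.isIn "VERIFICATION" l

def extract_trace_py_alt (stdout : String) : String :=
  let lines := (PySem.Str.split? stdout "\n").getD []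
  -- next((i for i, l in enumerate(lines) if _is_start(l)), None)
  match lines.findIdx? isStartB with
  | none => ""
  | some start =>
    -- tail = lines[start:]
    let tail := PySem.List.slice lines (some (start : Int)) none
    -- next((i for i, l in enumerate(tail) if _is_end(l)), len(tail))
    let stop := (tail.findIdx? isEndB).getD tail.length
    -- "\n".join(tail[:stop])
    PySem.Str.join "\n" (PySem.List.slice tail none (some (stop : Int)))

-- ===== PRECONDITION & SPEC =====
def Spec_extract_trace_py (stdout : String) (out : String) : Prop := out = extract_trace_py_alt stdout
instance (stdout : String) (out : String) : Decidable (Spec_extract_trace_py stdout out) := by unfold Spec_extract_trace_py; infer_instance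

-- ===== CLAIM (what is proved, stated in full; the proofs are below) =====
def Claim_equal_extract_trace_py : Prop := ∀ (stdout : String), Dom_extract_trace_py stdout → Spec_extract_trace_py stdout (extract_trace_py stdout)

-- ===== LEMMAS AND PROOFS =====

-- once in_trace is true, A collects the remaining lines up to the first end line
theorem aLoop_true (lines : List String) : ∀ acc : List String,
    aLoop lines acc true = acc ++ lines.takeWhile (fun l => !isEndB l) := by
  induction lines with
  | nil => intro acc; simp [aLoop]
  | cons l rest ih =>
    intro acc
    simp only [aLoop, ite_self]
    rw [show (PySem.Str.startswith l "** " || PySem.Str.isIn "VERIFICATION" l) = isEndB l from rfl,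
        List.takeWhile_cons]
    cases isEndB l
    · simp [ih]
    · simp

-- before the first start line A skips; from the first start line on it collects up to the first end line
theorem aLoop_false (lines : List String) : ∀ acc : List String,
    aLoop lines acc false =
      acc ++ ((lines.dropWhile (fun l => !isStartB l)).takeWhile (fun l => !isEndB l)) := by
  induction lines with
  | nil => intro acc; simp [aLoop]
  | cons l rest ih =>
    intro acc
    simp only [aLoop]
    rw [show (PySem.Str.isIn "Counterexample" l || PySem.Str.startswith l "Trace for ") = isStartB l from rfl,
        show (PySem.Str.startswith l "** " || PySem.Str.isIn "VERIFICATION" l) = isEndB l from rfl,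
        List.dropWhile_cons]
    cases isStartB l
    · simp [ih]
    · simp only [Bool.not_true, if_true]
      cases he : isEndB l
      · simp [he, aLoop_true]
      · simp [he]

-- if no element satisfies p, dropWhile (!p) drops everything
theorem dropWhile_not_eq_nil_of_findIdx?_none {α : Type} (p : α → Bool) (l : List α)
    (h : l.findIdx? p = none) : l.dropWhile (fun x => !p x) = [] := by
  rw [List.dropWhile_eq_nil_iff]
  intro x hx
  simpa using List.findIdx?_eq_none_iff.mp h x hx

-- dropping up to the first hit of p = dropWhile (!p)
theorem drop_findIdx?_eq_dropWhile {α : Type} (p : α → Bool) (l : List α) : ∀ s : Nat,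
    l.findIdx? p = some s → l.drop s = l.dropWhile (fun x => !p x) := by
  induction l with
  | nil => intro s h; simp at h
  | cons a t ih =>
    intro s h
    rw [List.findIdx?_cons] at h
    by_cases hp : p a = true
    · simp [hp] at h
      subst h; simp [hp]
    · simp [hp] at h
      obtain ⟨s', hs', rfl⟩ := Option.map_eq_some_iff.mp (by simpa using h)
      simp [hp, ih s' hs']
  
-- taking up to the first hit of q (or all, if none) = takeWhile (!q)
theorem take_findIdx?_eq_takeWhile {α : Type} (q : α → Bool) (l : List α) :
    l.take ((l.findIdx? q).getD l.length) = l.takeWhile (fun x => !q x) := by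
  induction l with
  | nil => simp
  | cons a t ih =>
    rw [List.findIdx?_cons]
    by_cases hq : q a = true
    · simp [hq]
    · simp only [hq, List.takeWhile_cons, Bool.not_eq_true] at *
      cases ht : t.findIdx? q with
      | none => simpa [ht, hq] using by simpa [ht] using ih
      | some s => simpa [ht, hq] using by simpa [ht] using ih

-- ===== VERDICT (by name: the statement is the Claim_ definition above) =====
theorem extract_trace_py_spec : Claim_equal_extract_trace_py := by
  intro stdout _
  unfold Spec_extract_trace_py extract_trace_py extract_trace_py_alt
  simp only [aLoop_false, List.nil_append]
  set lines := (PySem.Str.split? stdout "\n").getD [] with hl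
  cases hf : lines.findIdx? isStartB with
  | none =>
    simp [dropWhile_not_eq_nil_of_findIdx?_none isStartB lines hf]
  | some s =>
    simp only [PySem.List.slice_from_natCast, PySem.List.slice_to_natCast,
        take_findIdx?_eq_takeWhile, drop_findIdx?_eq_dropWhile isStartB lines s hf]
    by_cases h : (lines.dropWhile (fun l => !isStartB l)).takeWhile (fun l => !isEndB l) = []
    · simp [h, PySem.Str.join, PySem.Chars.join, List.intercalate]
    · simp [h]
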